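-- pv_equiv track=rewrite | github.com/danschumac1/mini_temporal_small_server | eval/backups/generation_corrections.py | fix_index_discontinuities
-- ===== SOURCE A (Python) =====
-- def fix_index_discontinuities(data):
--     """
--     This function receives a list of dictionaries with an 'INDEX' key and adjusts indices to ensure continuity.
--     It modifies the input data in-place.
--
--     Parameters:
--     data (list): A list of dictionaries each containing an 'INDEX' key.
--
--     Returns:
--     list: A list of the corrected indices if any corrections were made.
--     """
--     if not data or 'INDEX' not in data[0]:
--         return []  # return early if data is empty or not in the expected format
--
--     fixed_indices = []
--     previous_index = data[0]['INDEX'] - 1  # set starting point correctly assuming the first index is correct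
--
--     for i, entry in enumerate(data):
--         if entry['INDEX'] != previous_index + 1:
--             corrected_index = previous_index + 1
--             entry['INDEX'] = corrected_index
--             fixed_indices.append(corrected_index)
--         previous_index = entry['INDEX']
--
--     return fixed_indices
-- ===== SOURCE B (Python) =====
-- def fix_index_discontinuities(data):
--     if not data or 'INDEX' not in data[0]:
--         return []
--     base = data[0]['INDEX']
--     fixed_indices = [base + i for i, entry in enumerate(data) if entry['INDEX'] != base + i]
--     for i, entry in enumerate(data):
--         entry['INDEX'] = base + i
--     return fixed_indices
-- ===== Notes on version B (the rewrite author's own statement) =====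
-- stated objective: simpler
-- what changed: Replaces A's running previous_index accumulator (updated from the possibly-mutated entry each step) with direct positional arithmetic base+i, computing the returned list as a single comprehension; the in-place index repair becomes a separate uniform pass.
import Mathlib
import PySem

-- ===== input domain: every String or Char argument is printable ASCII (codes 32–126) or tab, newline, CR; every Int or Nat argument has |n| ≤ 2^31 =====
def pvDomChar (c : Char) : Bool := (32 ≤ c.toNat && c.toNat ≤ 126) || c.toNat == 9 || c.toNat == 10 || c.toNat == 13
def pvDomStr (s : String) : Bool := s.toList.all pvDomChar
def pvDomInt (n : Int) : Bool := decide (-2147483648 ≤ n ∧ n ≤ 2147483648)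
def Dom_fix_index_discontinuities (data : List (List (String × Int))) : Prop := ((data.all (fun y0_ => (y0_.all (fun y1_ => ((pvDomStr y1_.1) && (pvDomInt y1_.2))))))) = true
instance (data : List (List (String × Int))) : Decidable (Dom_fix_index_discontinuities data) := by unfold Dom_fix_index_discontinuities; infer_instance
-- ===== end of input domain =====

-- B replaces A's running previous_index accumulator with direct positional arithmetic
-- (base + i) and computes the result as a single comprehension; objective: simpler.
-- Both Pythons mutate the input dicts in place (to the same final state); the equivalence
-- proved here is about the RETURN value only.

-- ===== PORT A =====
-- A's loop: state (fixed_indices, previous_index); entry['INDEX'] is ported as getD with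
-- default 0 — under Pre_ the key is always present, so the default is never used.
def fixA_loop : List (List (String × Int)) → Int → List Int → List Int
  | [], _, acc => acc
  | e :: rest, prev, acc =>
    let v := (List.lookup "INDEX" e).getD 0
    if v ≠ prev + 1 then
      -- corrected_index = prev + 1; entry['INDEX'] := corrected; previous_index = corrected
      fixA_loop rest (prev + 1) (acc ++ [prev + 1])
    else
      fixA_loop rest v acc

def fix_index_discontinuities (data : List (List (String × Int))) : List Int :=
  match data with
  | [] => []
  | first :: _ =>
    match List.lookup "INDEX" first with
    | none => []                                   -- 'INDEX' not in data[0]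
    | some v0 => fixA_loop data (v0 - 1) []        -- previous_index = data[0]['INDEX'] - 1

-- ===== PORT B =====
-- comprehension over enumerate(data); entry['INDEX'] ported as getD 0 (key present under Pre_)
def fix_index_discontinuities_alt (data : List (List (String × Int))) : List Int :=
  match data with
  | [] => []
  | first :: _ =>
    match List.lookup "INDEX" first with
    | none => []
    | some base =>
      (PySem.List.enumerate data 0).filterMap fun p =>
        if (List.lookup "INDEX" p.2).getD 0 ≠ base + p.1 then some (base + p.1) else none

-- ===== PRECONDITION & SPEC =====
-- Pre_ excludes exactly the inputs where A raises KeyError: data whose first dict has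
-- 'INDEX' but some later dict lacks it; every input on which A returns stays inside.
def Pre_fix_index_discontinuities (data : List (List (String × Int))) : Prop :=
  List.lookup "INDEX" data.headI = none ∨
    ∀ e ∈ data, List.lookup "INDEX" e ≠ none
instance (data : List (List (String × Int))) : Decidable (Pre_fix_index_discontinuities data) := by unfold Pre_fix_index_discontinuities; infer_instance

def pvWitness_fix_index_discontinuities : (List (List (String × Int))) :=
  [[("INDEX", 3)], [("INDEX", 7)], [("INDEX", 5)]]

def Spec_fix_index_discontinuities (data : List (List (String × Int))) (out : List Int) : Prop := out = fix_index_discontinuities_alt data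
instance (data : List (List (String × Int))) (out : List Int) : Decidable (Spec_fix_index_discontinuities data out) := by unfold Spec_fix_index_discontinuities; infer_instance

-- ===== CLAIM (what is proved, stated in full; the proofs are below) =====
def Claim_equal_fix_index_discontinuities : Prop := ∀ (data : List (List (String × Int))), Dom_fix_index_discontinuities data → Pre_fix_index_discontinuities data → Spec_fix_index_discontinuities data (fix_index_discontinuities data)

-- ===== LEMMAS AND PROOFS =====

-- A's loop with previous_index = base + k - 1 produces exactly the positional comparison
-- against base + index for indices starting at k.
theorem fixA_loop_eq (l : List (List (String × Int))) (base : Int) :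
    ∀ (k : Nat) (acc : List Int),
      fixA_loop l (base + (k : Int) - 1) acc
        = acc ++ (PySem.List.enumerate l k).filterMap (fun p =>
            if (List.lookup "INDEX" p.2).getD 0 ≠ base + (p.1 : Int) then some (base + (p.1 : Int)) else none) := by
  induction l with
  | nil => intro k acc; simp [fixA_loop, PySem.List.enumerate]
  | cons e rest ih =>
    intro k acc
    have hb : base + (k : Int) - 1 + 1 = base + (k : Int) := by ring
    have hc : base + (k : Int) = base + (((k + 1 : Nat)) : Int) - 1 := by push_cast; ring
    simp only [fixA_loop, PySem.List.enumerate_cons, List.filterMap_cons, hb]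
    by_cases h : (List.lookup "INDEX" e).getD 0 = base + (k : Int)
    · rw [if_neg (by simp [h]), if_neg (by simp [h]), h, hc, ih]
      push_cast
      simp
    · rw [if_pos h, if_pos h, hc, ih]
      push_cast
      simp

-- ===== VERDICT (by name: the statement is the Claim_ definition above) =====
theorem fix_index_discontinuities_spec : Claim_equal_fix_index_discontinuities := by
  intro data _ _
  unfold Spec_fix_index_discontinuities fix_index_discontinuities fix_index_discontinuities_alt
  cases data with
  | nil => rfl
  | cons first rest =>
    cases h : List.lookup "INDEX" first with
    | none => simp [h]
    | some base =>
      simp only [h]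
      have := fixA_loop_eq (first :: rest) base 0 []
      simpa using this
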